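-- pv_equiv track=rewrite | github.com/Ekumen-OS/andino_webots | andino_webots/launch/spawn_andino_webots.launch.py | apply_colors
-- ===== SOURCE A (Python) =====
-- def apply_colors(robot_description: str):
--     """
--     Function to provide a hotfix to urdf2webots' issue with color declaration.
--     The package seems to require the color to be defined in a link at least once
--     to be used consecutively. To solve this issue without modifying the andino description package
--     the urdf is modified to define the color on each link that requires it
--     See #210 *https://github.com/cyberbotics/urdf2webots/issues/210)
--     """
--     colors_definitions = {
--         "yellow": '"1 0.95 0 1"',
--         "blue": '"0 0 1 1"',
--         "light_blue": '"0 0.5 0.8 1"',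
--         "black": '"0 0 0 1"',
--         "white": '"1 1 1 1"',
--         "red": '"0.8 0.0 0.0 1.0"',
--         "silver": '"0.79 0.82 0.93 1"',
--         "dark_grey": '"0.3 0.3 0.3 1"',
--     }
--     for color_name, color_values in colors_definitions.items():
--         robot_description = robot_description.replace(
--             f'<material name="{color_name}"/>',
--             f"""
--         <material>
--             <color rgba={color_values}/>
--         </material>""",
--         )
--     return robot_description
-- ===== SOURCE B (Python) =====
-- def apply_colors(robot_description: str):
--     """Single left-to-right scan: find each '<material name="NAME"/>' tag and,
--     when NAME is a known color, emit the rgba material block; one pass instead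
--     of eight whole-string replace passes."""
--     colors_definitions = {
--         "yellow": '"1 0.95 0 1"',
--         "blue": '"0 0 1 1"',
--         "light_blue": '"0 0.5 0.8 1"',
--         "black": '"0 0 0 1"',
--         "white": '"1 1 1 1"',
--         "red": '"0.8 0.0 0.0 1.0"',
--         "silver": '"0.79 0.82 0.93 1"',
--         "dark_grey": '"0.3 0.3 0.3 1"',
--     }
--     out = []
--     i = 0
--     n = len(robot_description)
--     while i < n:
--         if robot_description.startswith('<material name="', i):
--             e = i + 16
--             while e < n and (robot_description[e].isalnum() or robot_description[e] == '_'):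
--                 e += 1
--             name = robot_description[i + 16:e]
--             rgba = colors_definitions.get(name)
--             if rgba is not None and robot_description.startswith('"/>', e):
--                 out.append('\n        <material>\n            <color rgba='
--                            + rgba + '/>\n        </material>')
--                 i = e + 3
--                 continue
--         out.append(robot_description[i])
--         i += 1
--     return ''.join(out)
-- ===== Notes on version B (the rewrite author's own statement) =====
-- stated objective: alternative
-- what changed: A makes eight sequential whole-string .replace passes, one per color; B makes a single left-to-right scan that parses each material-name tag once where it stands and substitutes the rgba block via one dict lookup, leaving every other character untouched.
import Mathlib
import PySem

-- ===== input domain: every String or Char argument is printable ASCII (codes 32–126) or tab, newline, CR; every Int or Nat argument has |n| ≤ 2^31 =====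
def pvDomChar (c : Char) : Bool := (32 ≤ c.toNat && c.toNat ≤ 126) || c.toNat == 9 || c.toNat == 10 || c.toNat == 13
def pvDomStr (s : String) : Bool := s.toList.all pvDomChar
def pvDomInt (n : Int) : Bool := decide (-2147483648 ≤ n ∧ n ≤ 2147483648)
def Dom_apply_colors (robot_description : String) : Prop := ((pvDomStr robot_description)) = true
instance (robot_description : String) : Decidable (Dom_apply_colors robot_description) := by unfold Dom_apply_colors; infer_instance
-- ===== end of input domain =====

-- B replaces A's eight sequential whole-string replace passes by a single left-to-right
-- scan that parses each '<material name="NAME"/>' tag in place and substitutes the rgba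
-- block via one dictionary lookup (objective: alternative algorithm, same result).

-- ===== PORT A =====
-- the dict `colors_definitions` (iterated via .items() in insertion order)
def colorsDefs : List (String × String) :=
  [("yellow", "\"1 0.95 0 1\""),
   ("blue", "\"0 0 1 1\""),
   ("light_blue", "\"0 0.5 0.8 1\""),
   ("black", "\"0 0 0 1\""),
   ("white", "\"1 1 1 1\""),
   ("red", "\"0.8 0.0 0.0 1.0\""),
   ("silver", "\"0.79 0.82 0.93 1\""),
   ("dark_grey", "\"0.3 0.3 0.3 1\"")]

def apply_colors (robot_description : String) : String :=
  colorsDefs.foldl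
    (fun rd cv =>
      PySem.Str.replace rd ("<material name=\"" ++ cv.1 ++ "\"/>")
        ("\n        <material>\n            <color rgba=" ++ cv.2 ++ "/>\n        </material>"))
    robot_description

-- ===== PORT B =====
-- B scans the string once, character by character, with an index i; the port is the same
-- scan written as structural recursion over the code-point list (exact: the string is
-- consumed left to right, one character or one whole recognised tag per step).
def markerC : List Char := "<material name=\"".toList      -- the 16-char tag opener
def endPatC : List Char := "\"/>".toList                    -- the 3-char tag closer
-- Python's `ch.isalnum() or ch == '_'` (exact on the ASCII domain)
def isW (c : Char) : Bool := c.isAlphanum || c == '_'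
-- B's dict `colors_definitions`, on code points
def colorsC : List (List Char × List Char) :=
  [("yellow".toList, "\"1 0.95 0 1\"".toList),
   ("blue".toList, "\"0 0 1 1\"".toList),
   ("light_blue".toList, "\"0 0.5 0.8 1\"".toList),
   ("black".toList, "\"0 0 0 1\"".toList),
   ("white".toList, "\"1 1 1 1\"".toList),
   ("red".toList, "\"0.8 0.0 0.0 1.0\"".toList),
   ("silver".toList, "\"0.79 0.82 0.93 1\"".toList),
   ("dark_grey".toList, "\"0.3 0.3 0.3 1\"".toList)]
-- the replacement block appended for a recognised color value v
def replC (v : List Char) : List Char :=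
  "\n        <material>\n            <color rgba=".toList ++ v ++ "/>\n        </material>".toList

def scanC (l : List Char) : List Char :=
  match l with
  | [] => []
  | c :: t =>
    if markerC.isPrefixOf (c :: t) then
      let rest := (c :: t).drop 16
      let name := rest.takeWhile isW
      let after := rest.dropWhile isW
      match List.lookup name colorsC with
      | some v =>
        if endPatC.isPrefixOf after then replC v ++ scanC (after.drop 3)
        else c :: scanC t
      | none => c :: scanC t
    else c :: scanC t
termination_by l.length
decreasing_by
  · have h1 : (((c :: t).drop 16).dropWhile isW).length ≤ ((c :: t).drop 16).length :=
      List.length_dropWhile_le _ _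
    simp only [List.length_drop, List.length_cons] at h1 ⊢
    omega
  · simp
  · simp

def apply_colors_alt (robot_description : String) : String :=
  String.ofList (scanC robot_description.toList)

-- ===== PRECONDITION & SPEC =====
def Spec_apply_colors (robot_description : String) (out : String) : Prop := out = apply_colors_alt robot_description
instance (robot_description : String) (out : String) : Decidable (Spec_apply_colors robot_description out) := by unfold Spec_apply_colors; infer_instance

-- ===== CLAIM (what is proved, stated in full; the proofs are below) =====
def Claim_equal_apply_colors : Prop := ∀ (robot_description : String), Dom_apply_colors robot_description → Spec_apply_colors robot_description (apply_colors robot_description)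

-- ===== LEMMAS AND PROOFS =====

-- A clean structural version of Python str.replace for a nonempty pattern
def replaceC (old new : List Char) (l : List Char) : List Char :=
  match l with
  | [] => []
  | c :: t =>
    if h : old <+: (c :: t) ∧ old ≠ [] then
      new ++ replaceC old new ((c :: t).drop old.length)
    else c :: replaceC old new t
termination_by l.length
decreasing_by
  · have : 1 ≤ old.length := List.length_pos_iff.mpr h.2
    simp only [List.length_drop, List.length_cons]
    omega
  · simp

-- the full pattern A replaces for a color name nm, and A's pass list on code points
def patOf (nm : List Char) : List Char := markerC ++ nm ++ endPatC
def patsC : List (List Char × List Char) := colorsC.map (fun nv => (patOf nv.1, replC nv.2))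
def foldRepl (L : List (List Char × List Char)) (l : List Char) : List Char :=
  L.foldl (fun s pr => replaceC pr.1 pr.2 s) l

-- `blocksAll a p = true`: at no offset into `a` can `p` match, even overhanging into an
-- arbitrary continuation (a mismatch with p occurs already inside a)
def blocksAll (a p : List Char) : Bool :=
  (List.range a.length).all fun k =>
    (List.range p.length).any fun m =>
      decide (k + m < a.length) && (a.getD (k + m) ' ' != p.getD m ' ')

def goodL (L : List (List Char × List Char)) : Prop :=
  ∀ pr ∈ L, pr.1 ≠ [] ∧ pr.2 ≠ [] ∧ pr.2.getD 0 ' ' = '\n' ∧ '\n' ∉ pr.1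

lemma replaceC_nil (old new : List Char) : replaceC old new [] = [] := by rw [replaceC]

lemma replaceC_cons_pos (old new : List Char) (c : Char) (t : List Char)
    (h1 : old <+: (c :: t)) (h2 : old ≠ []) :
    replaceC old new (c :: t) = new ++ replaceC old new ((c :: t).drop old.length) := by
  rw [replaceC, dif_pos ⟨h1, h2⟩]

lemma replaceC_cons_neg (old new : List Char) (c : Char) (t : List Char)
    (h : ¬ old <+: (c :: t)) :
    replaceC old new (c :: t) = c :: replaceC old new t := by
  rw [replaceC, dif_neg (by tauto)]

lemma replaceC_append_match (old new : List Char) (t : List Char) (h2 : old ≠ []) :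
    replaceC old new (old ++ t) = new ++ replaceC old new t := by
  obtain ⟨c, os, rfl⟩ := List.exists_cons_of_ne_nil h2
  rw [List.cons_append, replaceC_cons_pos _ _ _ _ (by exact ⟨t, by simp⟩) h2]
  congr 1
  rw [← List.cons_append, List.drop_left]

-- PySem's replace.go with enough fuel computes replaceC
lemma go_eq (old new : List Char) (h2 : old ≠ []) :
    ∀ fuel (l acc : List Char), l.length ≤ fuel →
      PySem.Chars.replace.go old new fuel l acc = acc.reverse ++ replaceC old new l := by
  intro fuel
  induction fuel with
  | zero =>
    intro l acc hl
    have : l = [] := List.eq_nil_of_length_eq_zero (by omega)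
    subst this
    rw [PySem.Chars.replace.go, replaceC_nil, List.append_nil]
  | succ n ih =>
    intro l acc hl
    match l with
    | [] =>
      rw [PySem.Chars.replace.go, replaceC_nil, List.append_nil]
      simp
    | c :: t =>
      rw [PySem.Chars.replace.go]
      by_cases hp : old <+: (c :: t)
      · rw [if_pos (List.isPrefixOf_iff_prefix.mpr hp)]
        rw [ih _ _ (by simp at hl ⊢; have : 1 ≤ old.length := List.length_pos_iff.mpr h2; omega)]
        rw [replaceC_cons_pos _ _ _ _ hp h2]
        simp
      · rw [if_neg (by simp [List.isPrefixOf_iff_prefix]; exact hp)]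
        rw [ih _ _ (by simp at hl ⊢; omega)]
        rw [replaceC_cons_neg _ _ _ _ hp]
        simp

lemma replace_eq (old new l : List Char) (h2 : old ≠ []) :
    PySem.Chars.replace l old new = replaceC old new l := by
  rw [PySem.Chars.replace, if_neg (by simp [List.isEmpty_iff]; exact h2)]
  simpa using go_eq old new h2 l.length l [] le_rfl

lemma prefix_getD {p l : List Char} (h : p <+: l) {m : Nat} (hm : m < p.length) (d : Char) :
    l.getD m d = p.getD m d := by
  obtain ⟨t, rfl⟩ := h
  rw [List.getD_eq_getElem?_getD, List.getD_eq_getElem?_getD, List.getElem?_append_left hm]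

lemma blocks_not_prefix {a p : List Char} (hb : blocksAll a p = true) :
    ∀ k, k < a.length → ∀ u, ¬ p <+: (a.drop k ++ u) := by
  intro k hk u hpref
  unfold blocksAll at hb
  rw [List.all_eq_true] at hb
  have h1 := hb k (List.mem_range.mpr hk)
  rw [List.any_eq_true] at h1
  obtain ⟨m, hm, hcond⟩ := h1
  rw [List.mem_range] at hm
  simp only [Bool.and_eq_true, decide_eq_true_eq, bne_iff_ne] at hcond
  obtain ⟨hkm, hne⟩ := hcond
  apply hne
  have := prefix_getD hpref hm ' '
  rw [List.getD_eq_getElem?_getD, List.getElem?_append_left (by simp [List.length_drop]; omega),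
    List.getElem?_drop] at this
  rw [List.getD_eq_getElem?_getD, ← this]

lemma replaceC_commute (old new : List Char) :
    ∀ (a : List Char), (∀ k, k < a.length → ∀ u, ¬ old <+: (a.drop k ++ u)) →
      ∀ u, replaceC old new (a ++ u) = a ++ replaceC old new u := by
  intro a
  induction a with
  | nil => intro _ u; simp
  | cons c a' ih =>
    intro h u
    rw [List.cons_append, replaceC_cons_neg _ _ _ _ (by
      have := h 0 (by simp) u
      simpa using this)]
    rw [ih (fun k hk u' => by
      have := h (k+1) (by simp; omega) u'
      simpa using this) u]
    simp

lemma replaceSpec (old new : List Char) (h2 : old ≠ []) (u : List Char) :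
    replaceC old new u = u ∨
      ∃ w t, u = w ++ old ++ t ∧ replaceC old new u = w ++ new ++ replaceC old new t := by
  induction u with
  | nil => left; exact replaceC_nil _ _
  | cons c t ih =>
    by_cases hp : old <+: (c :: t)
    · right
      obtain ⟨s, hs⟩ := hp
      refine ⟨[], s, by simp [← hs], ?_⟩
      rw [replaceC_cons_pos _ _ _ _ ⟨s, hs⟩ h2]
      simp only [List.nil_append]
      congr 1
      rw [← hs, List.drop_left]
    · rw [replaceC_cons_neg _ _ _ _ hp]
      rcases ih with h | ⟨w, t', hu, hr⟩
      · left; rw [h]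
      · right
        exact ⟨c :: w, t', by simp [hu], by simp [hr]⟩

-- a failed match at the head stays failed after any replacement pass whose
-- replacement starts with '\n' (no pattern contains '\n')
lemma nmh_preserve (old new p : List Char) (h2 : old ≠ []) (hn : new ≠ [])
    (hnl : new.getD 0 ' ' = '\n') (hp : '\n' ∉ p) (c : Char) (u : List Char)
    (h : ¬ p <+: (c :: u)) : ¬ p <+: (c :: replaceC old new u) := by
  intro hpref
  rcases replaceSpec old new h2 u with he | ⟨w, t, hu, hr⟩
  · rw [he] at hpref; exact h hpref
  · rw [hr] at hpref
    by_cases hlen : p.length ≤ (c :: w).length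
    · apply h
      have hpcw : p <+: (c :: w) := by
        have h1 : p = ((c :: w) ++ (new ++ replaceC old new t)).take p.length := by
          have := List.prefix_iff_eq_take.mp hpref
          simpa using this
        rw [List.take_append_of_le_length hlen] at h1
        rw [h1]; exact List.take_prefix _ _
      rw [hu]
      calc p <+: (c :: w) := hpcw
        _ <+: ((c :: w) ++ (old ++ t)) := List.prefix_append _ _
        _ = c :: (w ++ old ++ t) := by simp
    · apply hp
      rw [Nat.not_le] at hlen
      have hget := prefix_getD hpref (m := (c :: w).length) hlen ' '
      have hrhs : ((c :: w) ++ (new ++ replaceC old new t)).getD (c :: w).length ' ' = '\n' := by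
        rw [List.getD_eq_getElem?_getD, List.getElem?_append_right le_rfl]
        simp only [Nat.sub_self]
        obtain ⟨nc, nt, rfl⟩ := List.exists_cons_of_ne_nil hn
        simpa using hnl
      rw [show c :: (w ++ new ++ replaceC old new t) = (c :: w) ++ (new ++ replaceC old new t) by simp] at hget
      rw [hrhs] at hget
      rw [hget, List.getD_eq_getElem (hn := hlen)]
      exact List.getElem_mem _

lemma fold_nil (L : List (List Char × List Char)) : foldRepl L [] = [] := by
  induction L with
  | nil => rfl
  | cons pr L' ih =>
    unfold foldRepl at ih ⊢
    rw [List.foldl_cons, replaceC_nil, ih]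

lemma fold_cons (L : List (List Char × List Char)) (hg : goodL L) (c : Char) :
    ∀ u, (∀ pr ∈ L, ¬ pr.1 <+: (c :: u)) → foldRepl L (c :: u) = c :: foldRepl L u := by
  induction L with
  | nil => intro u _; rfl
  | cons pr L' ih =>
    intro u h
    obtain ⟨h1, h2, h3, _⟩ := hg pr (by simp)
    unfold foldRepl
    rw [List.foldl_cons, replaceC_cons_neg _ _ _ _ (h pr (by simp))]
    have hg' : goodL L' := fun q hq => hg q (by simp [hq])
    have h' : ∀ q ∈ L', ¬ q.1 <+: (c :: replaceC pr.1 pr.2 u) := by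
      intro q hq
      exact nmh_preserve pr.1 pr.2 q.1 h1 h2 h3 (hg q (by simp [hq])).2.2.2 c u
        (h q (by simp [hq]))
    exact ih hg' (replaceC pr.1 pr.2 u) h'

lemma fold_commute (L : List (List Char × List Char)) (a : List Char)
    (h : ∀ pr ∈ L, ∀ k, k < a.length → ∀ u, ¬ pr.1 <+: (a.drop k ++ u)) :
    ∀ u, foldRepl L (a ++ u) = a ++ foldRepl L u := by
  induction L with
  | nil => intro u; rfl
  | cons pr L' ih =>
    intro u
    unfold foldRepl
    rw [List.foldl_cons, replaceC_commute pr.1 pr.2 a (h pr (by simp)) u]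
    exact ih (fun q hq => h q (by simp [hq])) (replaceC pr.1 pr.2 u)

-- decidable facts about the literal tables
set_option maxRecDepth 100000 in
lemma factGood : goodL patsC := by unfold goodL; decide
lemma factNodup : patsC.Nodup := by decide
set_option maxRecDepth 100000 in
lemma factPairs : ∀ pr ∈ patsC, ∀ pr' ∈ patsC, pr ≠ pr' → blocksAll pr.1 pr'.1 = true := by decide
set_option maxRecDepth 100000 in
lemma factRepl : ∀ pr ∈ patsC, ∀ pr' ∈ patsC, blocksAll pr.2 pr'.1 = true := by decide
lemma factLookup : ∀ nv ∈ colorsC, List.lookup nv.1 colorsC = some nv.2 := by decide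
lemma factNamesB : (colorsC.all fun nv => nv.1.all isW) = true := by decide
lemma factNames : ∀ nv ∈ colorsC, ∀ c ∈ nv.1, isW c = true := by
  have h := factNamesB
  rw [List.all_eq_true] at h
  intro nv hnv c hc
  have h2 := h nv hnv
  rw [List.all_eq_true] at h2
  exact h2 c hc

lemma lookup_mem {α β : Type} [BEq α] [LawfulBEq α] {a : α} {b : β} :
    ∀ {l : List (α × β)}, List.lookup a l = some b → (a, b) ∈ l := by
  intro l
  induction l with
  | nil => intro h; simp [List.lookup] at h
  | cons x r ih =>
    intro h
    obtain ⟨k, v⟩ := x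
    rw [List.lookup] at h
    by_cases he : a == k
    · rw [he] at h
      simp only [Option.some.injEq] at h
      have : (a, b) = (k, v) := by rw [LawfulBEq.eq_of_beq he, h]
      rw [this]
      exact List.mem_cons_self
    · rw [Bool.not_eq_true] at he
      rw [he] at h
      exact List.mem_cons_of_mem _ (ih h)

-- takeWhile/dropWhile across an append at a failing head
lemma takeWhile_append_cons {q : Char → Bool} {a : List Char} (ha : ∀ c ∈ a, q c = true)
    {b : Char} (hb : q b = false) (y : List Char) :
    (a ++ b :: y).takeWhile q = a ∧ (a ++ b :: y).dropWhile q = b :: y := by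
  induction a with
  | nil => simp [hb]
  | cons c a' ih =>
    have hc : q c = true := ha c (by simp)
    have ih' := ih (fun c h => ha c (by simp [h]))
    simp [hc, ih'.1, ih'.2]

-- unfolding of scanC at a cons
lemma scanC_cons (c : Char) (t : List Char) :
    scanC (c :: t) =
      (if markerC.isPrefixOf (c :: t) then
        match List.lookup (((c :: t).drop 16).takeWhile isW) colorsC with
        | some v =>
          if endPatC.isPrefixOf (((c :: t).drop 16).dropWhile isW) then
            replC v ++ scanC ((((c :: t).drop 16).dropWhile isW).drop 3)
          else c :: scanC t
        | none => c :: scanC t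
      else c :: scanC t) := by
  rw [scanC]

lemma markerC_len : markerC.length = 16 := by decide

lemma scanC_match (nm v : List Char) (hmem : (nm, v) ∈ colorsC) (t' : List Char)
    (c : Char) (t : List Char) (heq : patOf nm ++ t' = c :: t) :
    scanC (c :: t) = replC v ++ scanC t' := by
  have hshape : (c :: t) = markerC ++ (nm ++ endPatC ++ t') := by
    rw [← heq]; simp [patOf]
  have hm : markerC.isPrefixOf (c :: t) = true := by
    rw [List.isPrefixOf_iff_prefix, hshape]
    exact List.prefix_append _ _
  have hdrop : (c :: t).drop 16 = nm ++ ('"' :: '/' :: '>' :: t') := by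
    rw [hshape, ← markerC_len, List.drop_left]
    simp [endPatC]
  have htk := takeWhile_append_cons (q := isW) (a := nm)
    (fun ch hch => factNames (nm, v) hmem ch hch) (b := '"') (by decide) ('/' :: '>' :: t')
  rw [scanC_cons, if_pos hm, hdrop, htk.1, htk.2]
  rw [factLookup (nm, v) hmem]
  simp [endPatC, List.isPrefixOf]

lemma scanC_cons_neg (c : Char) (t : List Char)
    (h : ¬ ∃ nv ∈ colorsC, patOf nv.1 <+: (c :: t)) :
    scanC (c :: t) = c :: scanC t := by
  rw [scanC_cons]
  by_cases hm : markerC.isPrefixOf (c :: t)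
  · rw [if_pos hm]
    cases hlook : List.lookup (((c :: t).drop 16).takeWhile isW) colorsC with
    | none => rfl
    | some v =>
      by_cases hq : endPatC.isPrefixOf (((c :: t).drop 16).dropWhile isW)
      · exfalso
        apply h
        set name := ((c :: t).drop 16).takeWhile isW with hname
        refine ⟨(name, v), lookup_mem hlook, ?_⟩
        have hsplit : (c :: t) = markerC ++ (c :: t).drop 16 := by
          have h1 : markerC = (c :: t).take 16 := by
            have := List.prefix_iff_eq_take.mp (List.isPrefixOf_iff_prefix.mp hm)
            rwa [markerC_len] at this
          conv_lhs => rw [← List.take_append_drop 16 (c :: t)]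
          rw [← h1]
        obtain ⟨z, hz⟩ := List.isPrefixOf_iff_prefix.mp hq
        refine ⟨z, ?_⟩
        rw [hsplit]
        conv_rhs => rw [show (c :: t).drop 16 = name ++ ((c :: t).drop 16).dropWhile isW by
          rw [hname, List.takeWhile_append_dropWhile]]
        rw [← hz]
        simp [patOf]
      · show (if endPatC.isPrefixOf (((c :: t).drop 16).dropWhile isW) = true then
            replC v ++ scanC ((((c :: t).drop 16).dropWhile isW).drop 3)
          else c :: scanC t) = c :: scanC t
        rw [if_neg hq]
  · rw [if_neg hm]

-- main equivalence on code points: A's eight passes equal B's single scan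
lemma main_eq : ∀ n (l : List Char), l.length ≤ n → foldRepl patsC l = scanC l := by
  intro n
  induction n with
  | zero =>
    intro l hl
    have : l = [] := List.eq_nil_of_length_eq_zero (by omega)
    subst this
    rw [fold_nil, scanC]
  | succ n ih =>
    intro l hl
    match l with
    | [] => rw [fold_nil, scanC]
    | c :: t =>
      by_cases hm : ∃ nv ∈ colorsC, patOf nv.1 <+: (c :: t)
      · obtain ⟨⟨nm, v⟩, hmem, hpref⟩ := hm
        obtain ⟨t', heq⟩ := hpref
        have hpat : (patOf nm, replC v) ∈ patsC := List.mem_map_of_mem hmem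
        obtain ⟨L1, L2, hsplit⟩ := List.append_of_mem hpat
        have hnodup := factNodup
        rw [hsplit] at hnodup
        have hnotL1 : (patOf nm, replC v) ∉ L1 := by
          intro hin
          exact (List.disjoint_of_nodup_append hnodup) hin (by simp)
        have hnotL2 : (patOf nm, replC v) ∉ L2 := by
          have := (List.nodup_append.mp hnodup).2.1
          simp at this
          exact this.1
        have hmemL1 : ∀ pr ∈ L1, pr ∈ patsC := by
          intro pr hpr; rw [hsplit]; exact List.mem_append_left _ hpr
        have hmemL2 : ∀ pr ∈ L2, pr ∈ patsC := by
          intro pr hpr; rw [hsplit]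
          exact List.mem_append_right _ (List.mem_cons_of_mem _ hpr)
        have hp_ne : patOf nm ≠ [] := (factGood _ hpat).1
        have hplen : 1 ≤ (patOf nm).length := List.length_pos_iff.mpr hp_ne
        -- A's side
        have hfold : foldRepl patsC (c :: t) = replC v ++ foldRepl patsC t' := by
          rw [← heq]
          have e1 : ∀ u, foldRepl patsC u =
              foldRepl L2 (replaceC (patOf nm) (replC v) (foldRepl L1 u)) := by
            intro u
            rw [hsplit]
            unfold foldRepl
            rw [List.foldl_append, List.foldl_cons]
          rw [e1]
          rw [fold_commute L1 (patOf nm) (fun pr hpr k hk u => by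
            exact blocks_not_prefix (factPairs _ hpat _ (hmemL1 pr hpr)
              (fun hc => hnotL1 (hc ▸ hpr))) k hk u) t']
          rw [replaceC_append_match _ _ _ hp_ne]
          rw [fold_commute L2 (replC v) (fun pr hpr k hk u => by
            exact blocks_not_prefix (factRepl _ hpat _ (hmemL2 pr hpr)) k hk u)]
          rw [← e1 t']
        rw [hfold]
        have ht' : t'.length ≤ n := by
          have := congrArg List.length heq
          simp at this hl
          omega
        rw [ih t' ht']
        exact (scanC_match nm v hmem t' c t heq).symm
      · have hnone : ∀ pr ∈ patsC, ¬ pr.1 <+: (c :: t) := by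
          intro pr hpr hpref
          obtain ⟨nv, hnv, rfl⟩ := List.mem_map.mp hpr
          exact hm ⟨nv, hnv, hpref⟩
        rw [fold_cons patsC factGood c t hnone]
        simp only [List.length_cons] at hl
        rw [ih t (by omega)]
        exact (scanC_cons_neg c t hm).symm

-- bridge: A's string-level fold computes foldRepl on code points
lemma patsEq :
    colorsDefs.map (fun cv =>
      (("<material name=\"" ++ cv.1 ++ "\"/>").toList,
       ("\n        <material>\n            <color rgba=" ++ cv.2 ++ "/>\n        </material>").toList)) = patsC := by
  decide

set_option maxHeartbeats 1000000 in
lemma fold_str_toList (L : List (String × String))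
    (hL : ∀ cv ∈ L, ("<material name=\"" ++ cv.1 ++ "\"/>").toList ≠ []) :
    ∀ s : String,
      (L.foldl (fun rd cv =>
        PySem.Str.replace rd ("<material name=\"" ++ cv.1 ++ "\"/>")
          ("\n        <material>\n            <color rgba=" ++ cv.2 ++ "/>\n        </material>")) s).toList =
      foldRepl (L.map (fun cv =>
        (("<material name=\"" ++ cv.1 ++ "\"/>").toList,
         ("\n        <material>\n            <color rgba=" ++ cv.2 ++ "/>\n        </material>").toList))) s.toList := by
  induction L with
  | nil => intro s; rfl
  | cons cv L' ih =>
    intro s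
    rw [List.foldl_cons, List.map_cons]
    unfold foldRepl
    rw [List.foldl_cons]
    have := ih (fun q hq => hL q (by simp [hq])) (PySem.Str.replace s ("<material name=\"" ++ cv.1 ++ "\"/>")
          ("\n        <material>\n            <color rgba=" ++ cv.2 ++ "/>\n        </material>"))
    unfold foldRepl at this
    rw [this, PySem.Str.toList_replace, replace_eq _ _ _ (hL cv (by simp))]

set_option maxHeartbeats 1000000 in
set_option maxRecDepth 100000 in
lemma apply_colors_toList (s : String) :
    (apply_colors s).toList = foldRepl patsC s.toList := by
  unfold apply_colors
  rw [fold_str_toList colorsDefs (by decide) s, patsEq]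

-- ===== VERDICT (by name: the statement is the Claim_ definition above) =====
theorem apply_colors_spec : Claim_equal_apply_colors := by
  unfold Claim_equal_apply_colors
  intro s _
  unfold Spec_apply_colors
  have h : (apply_colors s).toList = (apply_colors_alt s).toList := by
    rw [apply_colors_toList, main_eq s.toList.length s.toList le_rfl]
    unfold apply_colors_alt
    rw [String.toList_ofList]
  calc apply_colors s = String.ofList (apply_colors s).toList := by
        rw [String.ofList_toList]
    _ = String.ofList (apply_colors_alt s).toList := by rw [h]
    _ = apply_colors_alt s := by rw [String.ofList_toList]
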